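-- pv_equiv track=rewrite | github.com/anup557/sdfa | default/default_core/attack_2_rounds/finding_trail.py | list_subset
-- ===== SOURCE A (Python) =====
-- def list_subset(list1, list2):
--     if len(list1) != len(list2):
--         return 0
--
--     for pos in range(len(list1)):
--         if list1[pos] == 1:
--             if list2[pos] != 1:
--                 return 0
--     return 1
-- ===== SOURCE B (Python) =====
-- def list_subset(list1, list2):
--     if len(list1) != len(list2):
--         return 0
--     ones1 = {i for i, v in enumerate(list1) if v == 1}
--     ones2 = {i for i, v in enumerate(list2) if v == 1}
--     return int(ones1 <= ones2)
-- ===== Notes on version B (the rewrite author's own statement) =====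
-- stated objective: idiomatic
-- what changed: Replaces the positional short-circuit scan with two index-set comprehensions over enumerate and a single set subset test.
import Mathlib
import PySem

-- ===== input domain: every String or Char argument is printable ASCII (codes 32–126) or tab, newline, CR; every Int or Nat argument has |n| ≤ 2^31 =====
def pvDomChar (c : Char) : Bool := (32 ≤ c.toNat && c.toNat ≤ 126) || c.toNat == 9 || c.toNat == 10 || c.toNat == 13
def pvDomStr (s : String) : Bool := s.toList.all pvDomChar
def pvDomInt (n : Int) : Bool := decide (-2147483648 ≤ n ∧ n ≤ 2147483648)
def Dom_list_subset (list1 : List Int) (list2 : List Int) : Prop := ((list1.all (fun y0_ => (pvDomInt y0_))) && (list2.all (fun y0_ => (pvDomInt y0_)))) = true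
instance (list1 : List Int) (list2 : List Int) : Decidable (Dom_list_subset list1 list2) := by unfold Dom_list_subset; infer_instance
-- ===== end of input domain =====

-- B replaces A's positional short-circuit scan by two index-set comprehensions and one set subset test (idiomatic; same O(n) cost).


-- ===== PORT A =====
-- the 'for pos in range(len(list1))' loop with early return 0
def listSubsetGo (list1 : List Int) (list2 : List Int) : List Int → Int
  | [] => 1
  | pos :: rest =>
    if PySem.List.pyGet? list1 pos = some 1 then
      if PySem.List.pyGet? list2 pos ≠ some 1 then 0
      else listSubsetGo list1 list2 rest
    else listSubsetGo list1 list2 rest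

def list_subset (list1 : List Int) (list2 : List Int) : Int :=
  if list1.length ≠ list2.length then 0
  else listSubsetGo list1 list2 (PySem.List.pyRange 0 list1.length 1)

-- ===== PORT B =====
-- {i for i, v in enumerate(l) if v == 1}
def onesIdx (l : List Int) : PySem.Set Int :=
  PySem.Set.ofList ((PySem.List.enumerate l 0).filterMap (fun p => if p.2 = 1 then some p.1 else none))

def list_subset_alt (list1 : List Int) (list2 : List Int) : Int :=
  if list1.length ≠ list2.length then 0
  else if PySem.Set.issubset (onesIdx list1) (onesIdx list2) then 1 else 0

-- ===== PRECONDITION & SPEC =====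
def Spec_list_subset (list1 : List Int) (list2 : List Int) (out : Int) : Prop := out = list_subset_alt list1 list2
instance (list1 : List Int) (list2 : List Int) (out : Int) : Decidable (Spec_list_subset list1 list2 out) := by unfold Spec_list_subset; infer_instance

-- ===== CLAIM (what is proved, stated in full; the proofs are below) =====
def Claim_equal_list_subset : Prop := ∀ (list1 : List Int) (list2 : List Int), Dom_list_subset list1 list2 → Spec_list_subset list1 list2 (list_subset list1 list2)

-- ===== LEMMAS AND PROOFS =====
lemma listSubsetGo_eq (l1 l2 : List Int) (ps : List Int) :
    listSubsetGo l1 l2 ps =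
      if ∀ p ∈ ps, PySem.List.pyGet? l1 p = some 1 → PySem.List.pyGet? l2 p = some 1 then 1 else 0 := by
  induction ps with
  | nil => simp [listSubsetGo]
  | cons p rest ih =>
    simp only [listSubsetGo, ih]
    by_cases h1 : PySem.List.pyGet? l1 p = some 1 <;>
      by_cases h2 : PySem.List.pyGet? l2 p = some 1 <;>
      simp [h1, h2]

lemma mem_onesIdx (l : List Int) (i : Int) :
    i ∈ onesIdx l ↔ ∃ k : Nat, ∃ _ : k < l.length, i = (k : Int) ∧ l[k] = 1 := by
  simp only [onesIdx, PySem.Set.mem_ofList, List.mem_filterMap]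
  constructor
  · rintro ⟨p, hp, hif⟩
    rcases (PySem.List.mem_enumerate_iff _ _ _).1 hp with ⟨k, hk, rfl⟩
    by_cases h : l[k] = 1
    · simp only [h, if_pos, Option.some.injEq] at hif
      exact ⟨k, hk, by simpa using hif.symm, h⟩
    · simp [h] at hif
  · rintro ⟨k, hk, rfl, h1⟩
    exact ⟨((k : Int), l[k]), (PySem.List.mem_enumerate_iff _ _ _).2 ⟨k, hk, by simp⟩, by simp [h1]⟩

lemma cond_iff (l1 l2 : List Int) (hlen : l1.length = l2.length) :
    (∀ p ∈ PySem.List.pyRange 0 l1.length 1,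
        PySem.List.pyGet? l1 p = some 1 → PySem.List.pyGet? l2 p = some 1)
      ↔ (∀ i ∈ onesIdx l1, i ∈ onesIdx l2) := by
  constructor
  · intro h i hi
    rcases (mem_onesIdx l1 i).1 hi with ⟨k, hk, rfl, h1⟩
    have hmem : (k : Int) ∈ PySem.List.pyRange 0 l1.length 1 := by
      rw [PySem.List.mem_pyRange_one]; omega
    have hget1 : PySem.List.pyGet? l1 (k : Int) = some 1 := by
      rw [PySem.List.pyGet?_natCast]
      simp [List.getElem?_eq_getElem hk, h1]
    have := h _ hmem hget1
    rw [PySem.List.pyGet?_natCast] at this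
    have hk2 : k < l2.length := by omega
    rw [List.getElem?_eq_getElem hk2] at this
    exact (mem_onesIdx l2 _).2 ⟨k, hk2, rfl, by simpa using this⟩
  · intro h p hmem hget1
    rw [PySem.List.mem_pyRange_one] at hmem
    obtain ⟨k, rfl⟩ : ∃ k : Nat, p = (k : Int) := ⟨p.toNat, by omega⟩
    have hk : k < l1.length := by exact_mod_cast hmem.2
    rw [PySem.List.pyGet?_natCast, List.getElem?_eq_getElem hk] at hget1
    have h1 : l1[k] = 1 := by simpa using hget1
    have hi2 := h _ ((mem_onesIdx l1 _).2 ⟨k, hk, rfl, h1⟩)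
    rcases (mem_onesIdx l2 _).1 hi2 with ⟨k', hk', hkk, h2⟩
    have : k' = k := by exact_mod_cast hkk.symm
    subst this
    rw [PySem.List.pyGet?_natCast, List.getElem?_eq_getElem hk', h2]

-- ===== VERDICT (by name: the statement is the Claim_ definition above) =====
theorem list_subset_spec : Claim_equal_list_subset := by
  intro l1 l2 _
  unfold Spec_list_subset list_subset list_subset_alt
  by_cases hlen : l1.length = l2.length
  · rw [if_neg (show ¬ l1.length ≠ l2.length by omega),
       if_neg (show ¬ l1.length ≠ l2.length by omega), listSubsetGo_eq]
    simp only [cond_iff l1 l2 hlen, ← PySem.Set.issubset_iff]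
  · simp [hlen]
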